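-- pv_equiv track=rewrite | github.com/canaler1215/boatrace | ml/src/scripts/evaluate_predictions.py | _finish_to_combo
-- ===== SOURCE A (Python) =====
-- def _finish_to_combo(finish: dict[int, int]) -> str | None:
--     """{boat_no: finish_position} → '1-2-3' 形式. 1〜3 着が揃わなければ None."""
--     inv: dict[int, int] = {}
--     for bn, pos in finish.items():
--         if pos in (1, 2, 3):
--             inv[pos] = bn
--     if {1, 2, 3}.issubset(inv.keys()):
--         return f"{inv[1]}-{inv[2]}-{inv[3]}"
--     return None
-- ===== SOURCE B (Python) =====
-- def _last_boat(finish, target):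
--     found = None
--     for bn, pos in finish.items():
--         if pos == target:
--             found = bn
--     return found
--
--
-- def _finish_to_combo(finish: dict[int, int]) -> str | None:
--     a = _last_boat(finish, 1)
--     b = _last_boat(finish, 2)
--     c = _last_boat(finish, 3)
--     if a is None or b is None or c is None:
--         return None
--     return f"{a}-{b}-{c}"
-- ===== Notes on version B (the rewrite author's own statement) =====
-- stated objective: alternative
-- what changed: B replaces A's inverse-index dict build (position -> boat) plus subset check with three direct last-match scans of the items, one per target position.
import Mathlib
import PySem

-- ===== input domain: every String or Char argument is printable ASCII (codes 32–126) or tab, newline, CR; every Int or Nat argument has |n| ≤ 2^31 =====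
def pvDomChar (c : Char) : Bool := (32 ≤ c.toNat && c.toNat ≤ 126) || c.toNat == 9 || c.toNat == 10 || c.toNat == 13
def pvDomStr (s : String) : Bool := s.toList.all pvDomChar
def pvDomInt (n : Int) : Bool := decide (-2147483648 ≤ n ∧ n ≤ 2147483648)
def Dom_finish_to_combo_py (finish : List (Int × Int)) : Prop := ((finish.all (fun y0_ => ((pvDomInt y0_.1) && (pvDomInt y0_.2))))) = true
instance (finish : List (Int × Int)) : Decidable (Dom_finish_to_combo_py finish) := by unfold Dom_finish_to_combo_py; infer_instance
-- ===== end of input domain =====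

-- B replaces A's inverse-index dict with three direct last-match scans (alternative decomposition, same cost).

-- ===== PORT A =====
-- inv: dict[int, int] built by one pass; then subset check and f-string.
def finish_to_combo_py (finish : List (Int × Int)) : Option String :=
  let inv : PySem.Dict Int Int :=
    finish.foldl (fun inv p =>
      if p.2 = 1 ∨ p.2 = 2 ∨ p.2 = 3 then inv.insert p.2 p.1 else inv) PySem.Dict.empty
  -- {1,2,3}.issubset(inv.keys()) then f"{inv[1]}-{inv[2]}-{inv[3]}"
  if inv.contains 1 ∧ inv.contains 2 ∧ inv.contains 3 then
    match inv.get? 1, inv.get? 2, inv.get? 3 with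
    | some a, some b, some c =>
        some (PySem.Int.toStr a ++ "-" ++ PySem.Int.toStr b ++ "-" ++ PySem.Int.toStr c)
    | _, _, _ => none   -- unreachable: contains guarantees some
  else none

-- ===== PORT B =====
-- _last_boat: scan items, remember the last boat whose finish equals target.
def lastBoat (finish : List (Int × Int)) (target : Int) : Option Int :=
  finish.foldl (fun found p => if p.2 = target then some p.1 else found) none

-- 'if a is None or b is None or c is None: return None' as nested none-checks
def finish_to_combo_py_alt (finish : List (Int × Int)) : Option String :=
  match lastBoat finish 1 with
  | none => none
  | some a =>
    match lastBoat finish 2 with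
    | none => none
    | some b =>
      match lastBoat finish 3 with
      | none => none
      | some c =>
          some (PySem.Int.toStr a ++ "-" ++ PySem.Int.toStr b ++ "-" ++ PySem.Int.toStr c)

-- ===== PRECONDITION & SPEC =====
-- Pre_ requires distinct boat numbers: a Python dict cannot have duplicate keys, so every real
-- input satisfies it; it only rules out List encodings that correspond to no dict.
def Pre_finish_to_combo_py (finish : List (Int × Int)) : Prop :=
  (finish.map Prod.fst).Nodup
instance (finish : List (Int × Int)) : Decidable (Pre_finish_to_combo_py finish) := by
  unfold Pre_finish_to_combo_py; infer_instance

def pvWitness_finish_to_combo_py : (List (Int × Int)) := [(4, 2), (5, 1), (6, 3), (2, 4)]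

def Spec_finish_to_combo_py (finish : List (Int × Int)) (out : Option String) : Prop := out = finish_to_combo_py_alt finish
instance (finish : List (Int × Int)) (out : Option String) : Decidable (Spec_finish_to_combo_py finish out) := by unfold Spec_finish_to_combo_py; infer_instance

-- ===== CLAIM (what is proved, stated in full; the proofs are below) =====
def Claim_equal_finish_to_combo_py : Prop := ∀ (finish : List (Int × Int)), Dom_finish_to_combo_py finish → Pre_finish_to_combo_py finish → Spec_finish_to_combo_py finish (finish_to_combo_py finish)

-- ===== LEMMAS AND PROOFS =====

-- A's inverse dict looked up at a target position t ∈ {1,2,3} holds exactly the last boat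
-- whose finish equals t — which is what B's lastBoat scan computes.
theorem fold_get_eq_lastBoat (finish : List (Int × Int)) (d : PySem.Dict Int Int)
    (t : Int) (ht : t = 1 ∨ t = 2 ∨ t = 3) :
    (finish.foldl (fun inv p =>
      if p.2 = 1 ∨ p.2 = 2 ∨ p.2 = 3 then inv.insert p.2 p.1 else inv) d).get? t
    = finish.foldl (fun found p => if p.2 = t then some p.1 else found) (d.get? t) := by
  induction finish generalizing d with
  | nil => rfl
  | cons p rest ih =>
      simp only [List.foldl_cons]
      by_cases hp : p.2 = 1 ∨ p.2 = 2 ∨ p.2 = 3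
      · rw [if_pos hp, ih]
        rw [PySem.Dict.get?_insert]
        by_cases hte : t = p.2
        · rw [if_pos hte, if_pos hte.symm]
        · rw [if_neg hte, if_neg (fun h => hte h.symm)]
      · rw [if_neg hp, ih]
        have hne : p.2 ≠ t := by
          intro h; exact hp (h ▸ ht)
        rw [if_neg hne]

theorem finish_to_combo_py_spec : Claim_equal_finish_to_combo_py := by
  intro finish _ _
  show finish_to_combo_py finish = finish_to_combo_py_alt finish
  unfold finish_to_combo_py finish_to_combo_py_alt lastBoat
  have h1 := fold_get_eq_lastBoat finish PySem.Dict.empty 1 (by norm_num)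
  have h2 := fold_get_eq_lastBoat finish PySem.Dict.empty 2 (by norm_num)
  have h3 := fold_get_eq_lastBoat finish PySem.Dict.empty 3 (by norm_num)
  simp only [PySem.Dict.get?_empty] at h1 h2 h3
  simp only [PySem.Dict.contains_eq_isSome_get?, h1, h2, h3]
  cases finish.foldl (fun found p => if p.2 = 1 then some p.1 else found) (none : Option Int) <;>
  cases finish.foldl (fun found p => if p.2 = 2 then some p.1 else found) (none : Option Int) <;>
  cases finish.foldl (fun found p => if p.2 = 3 then some p.1 else found) (none : Option Int) <;>
  simp
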